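-- pv_equiv track=rewrite | github.com/jasongdove/advent-of-code | adventofcode/year2015/day03.py | get_houses
-- ===== SOURCE A (Python) =====
-- def get_houses(script):
--     x = 0
--     y = 0
--     houses = {(x, y)}
--     for direction in script:
--         match direction:
--             case '<':
--                 x -= 1
--             case '>':
--                 x += 1
--             case '^':
--                 y -= 1
--             case 'v':
--                 y += 1
--         houses.add((x, y))
--     return houses
-- ===== SOURCE B (Python) =====
-- def get_houses(script):
--     DELTA = {'<': (-1, 0), '>': (1, 0), '^': (0, -1), 'v': (0, 1)}
--
--     def solve(lo, hi):
--         # visited houses relative to the segment's start, plus the net displacement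
--         if hi - lo == 0:
--             return {(0, 0)}, (0, 0)
--         if hi - lo == 1:
--             d = DELTA.get(script[lo], (0, 0))
--             return {(0, 0), d}, d
--         mid = (lo + hi) // 2
--         h1, (ax, ay) = solve(lo, mid)
--         h2, (bx, by) = solve(mid, hi)
--         return h1 | {(ax + x, ay + y) for (x, y) in h2}, (ax + bx, ay + by)
--
--     return solve(0, len(script))[0]
-- ===== Notes on version B (the rewrite author's own statement) =====
-- stated objective: alternative
-- what changed: B replaces A's stateful single-pass cursor loop by a divide-and-conquer: each half of the script is solved recursively into a (relative visited set, net displacement) pair, and halves are combined by translating the right half's set by the left half's displacement.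
import Mathlib
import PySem

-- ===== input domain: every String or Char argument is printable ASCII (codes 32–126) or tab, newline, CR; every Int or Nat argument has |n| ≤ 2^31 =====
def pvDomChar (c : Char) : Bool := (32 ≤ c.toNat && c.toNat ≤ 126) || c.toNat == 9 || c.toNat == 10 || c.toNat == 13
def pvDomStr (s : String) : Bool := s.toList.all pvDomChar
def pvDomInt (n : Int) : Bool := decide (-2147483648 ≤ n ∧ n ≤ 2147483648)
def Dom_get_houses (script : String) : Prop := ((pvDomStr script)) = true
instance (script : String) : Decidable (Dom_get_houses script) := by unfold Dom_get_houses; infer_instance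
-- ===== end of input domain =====

-- B replaces A's stateful single-pass cursor loop by a divide-and-conquer over the script:
-- each half is solved into a (relative visited set, net displacement) pair and the halves are
-- combined by translating the right half's set; objective: alternative algorithm, same results.

-- ===== PORT A =====
-- the loop body of A (match on the direction, then add the new position to the set)
def pvStepA (s : Int × Int × PySem.Set (Int × Int)) (direction : Char) : Int × Int × PySem.Set (Int × Int) :=
  let x := s.1; let y := s.2.1; let houses := s.2.2
  let p : Int × Int :=
    if direction = '<' then (x - 1, y)
    else if direction = '>' then (x + 1, y)
    else if direction = '^' then (x, y - 1)
    else if direction = 'v' then (x, y + 1)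
    else (x, y)
  (p.1, p.2, PySem.Set.add houses (p.1, p.2))

def get_houses (script : String) : List (Int × Int) :=
  (script.toList.foldl pvStepA (0, 0, PySem.Set.ofList [((0 : Int), (0 : Int))])).2.2

-- ===== PORT B =====
def pvDelta : PySem.Dict Char (Int × Int) :=
  PySem.Dict.ofList [('<', (-1, 0)), ('>', (1, 0)), ('^', (0, -1)), ('v', (0, 1))]

-- combine (h1, (ax, ay)) (h2, (bx, by)) = (h1 | {(ax+x, ay+y) for (x,y) in h2}, (ax+bx, ay+by))
def pvCombine (a b : PySem.Set (Int × Int) × Int × Int) : PySem.Set (Int × Int) × Int × Int :=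
  (PySem.Set.union a.1 (PySem.Set.ofList (b.1.map (fun p => (a.2.1 + p.1, a.2.2 + p.2)))),
   (a.2.1 + b.2.1, a.2.2 + b.2.2))

-- solve(lo, hi), transcribed on the sub-list script[lo:hi]; mid-lo = (hi-lo)//2 = length/2
def pvSolve : List Char → PySem.Set (Int × Int) × Int × Int
  | [] => (PySem.Set.ofList [((0 : Int), (0 : Int))], (0, 0))
  | [c] =>
      let d := PySem.Dict.getD pvDelta c (0, 0)
      (PySem.Set.ofList [(0, 0), d], d)
  | c1 :: c2 :: rest =>
      let l := c1 :: c2 :: rest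
      let mid := l.length / 2
      pvCombine (pvSolve (l.take mid)) (pvSolve (l.drop mid))
  termination_by l => l.length
  decreasing_by
    · simp [List.length_take]; omega
    · simp [List.length_drop]; omega

def get_houses_alt (script : String) : List (Int × Int) :=
  (pvSolve script.toList).1

-- ===== PRECONDITION & SPEC =====
def Spec_get_houses (script : String) (out : List (Int × Int)) : Prop := out = get_houses_alt script
instance (script : String) (out : List (Int × Int)) : Decidable (Spec_get_houses script out) := by unfold Spec_get_houses; infer_instance

-- ===== CLAIM (what is proved, stated in full; the proofs are below) =====
def Claim_equal_get_houses : Prop := ∀ (script : String), Dom_get_houses script → Spec_get_houses script (get_houses script)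

-- ===== LEMMAS AND PROOFS =====

-- the per-character step, as a pair
def pvD (c : Char) : Int × Int := PySem.Dict.getD pvDelta c (0, 0)

-- the sequence of positions visited after each step, starting from (x, y)
def pvPath (x y : Int) : List Char → List (Int × Int)
  | [] => []
  | c :: l => (x + (pvD c).1, y + (pvD c).2) :: pvPath (x + (pvD c).1) (y + (pvD c).2) l

-- net displacement of a script
def pvDisp : List Char → Int × Int
  | [] => (0, 0)
  | c :: l => ((pvD c).1 + (pvDisp l).1, (pvD c).2 + (pvDisp l).2)

theorem pvD_eq (c : Char) : pvD c =
    if c = '<' then (-1, 0) else if c = '>' then (1, 0)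
    else if c = '^' then (0, -1) else if c = 'v' then (0, 1) else (0, 0) := by
  have hD : pvDelta.items = [('<', (-1, 0)), ('>', (1, 0)), ('^', (0, -1)), ('v', (0, 1))] := rfl
  by_cases h1 : c = '<'
  · subst h1; decide
  by_cases h2 : c = '>'
  · subst h2; decide
  by_cases h3 : c = '^'
  · subst h3; decide
  by_cases h4 : c = 'v'
  · subst h4; decide
  have b1 : (('<' : Char) == c) = false := beq_eq_false_iff_ne.mpr (Ne.symm h1)
  have b2 : (('>' : Char) == c) = false := beq_eq_false_iff_ne.mpr (Ne.symm h2)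
  have b3 : (('^' : Char) == c) = false := beq_eq_false_iff_ne.mpr (Ne.symm h3)
  have b4 : (('v' : Char) == c) = false := beq_eq_false_iff_ne.mpr (Ne.symm h4)
  simp [pvD, PySem.Dict.getD, PySem.Dict.get?, hD, List.find?, b1, b2, b3, b4, h1, h2, h3, h4]

theorem pvStepA_eq (x y : Int) (h : PySem.Set (Int × Int)) (c : Char) :
    pvStepA (x, y, h) c =
      (x + (pvD c).1, y + (pvD c).2,
       PySem.Set.add h (x + (pvD c).1, y + (pvD c).2)) := by
  simp only [pvStepA, pvD_eq]
  split_ifs <;> subst_vars <;> simp_all [sub_eq_add_neg]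

theorem foldA (l : List Char) : ∀ (x y : Int) (h : PySem.Set (Int × Int)),
    (l.foldl pvStepA (x, y, h)).2.2 = (pvPath x y l).foldl PySem.Set.add h := by
  induction l with
  | nil => intro x y h; rfl
  | cons c l ih =>
      intro x y h
      simp only [List.foldl_cons, pvStepA_eq, pvPath, ih]

-- translating the start translates the path
theorem pvPath_map (a b : Int) (l : List Char) : ∀ (x y : Int),
    pvPath (a + x) (b + y) l = (pvPath x y l).map (fun p => (a + p.1, b + p.2)) := by
  induction l with
  | nil => intro x y; rfl
  | cons c l ih =>
      intro x y
      simp only [pvPath, List.map_cons, add_assoc, ih]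

theorem pvPath_append (l1 l2 : List Char) : ∀ (x y : Int),
    pvPath x y (l1 ++ l2) =
      pvPath x y l1 ++ pvPath (x + (pvDisp l1).1) (y + (pvDisp l1).2) l2 := by
  induction l1 with
  | nil => intro x y; simp [pvPath, pvDisp]
  | cons c l ih =>
      intro x y
      simp only [List.cons_append, pvPath, pvDisp, ih, add_assoc]

theorem pvDisp_append (l1 l2 : List Char) :
    pvDisp (l1 ++ l2) = ((pvDisp l1).1 + (pvDisp l2).1, (pvDisp l1).2 + (pvDisp l2).2) := by
  induction l1 with
  | nil => simp [pvDisp]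
  | cons c l ih => simp [pvDisp, ih, add_assoc]

-- the endpoint is a visited (or the starting) house
theorem pvDisp_mem (l : List Char) : ∀ (x y : Int),
    (x + (pvDisp l).1, y + (pvDisp l).2) ∈ (x, y) :: pvPath x y l := by
  induction l with
  | nil => intro x y; simp [pvDisp]
  | cons c l ih =>
      intro x y
      simp only [pvDisp, pvPath, ← add_assoc]
      exact List.mem_cons_of_mem _ (ih (x + (pvD c).1) (y + (pvD c).2))

theorem foldl_add_ofList {α : Type} [BEq α] (A P : List α) :
    P.foldl PySem.Set.add (PySem.Set.ofList A) = PySem.Set.ofList (A ++ P) := by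
  rw [PySem.Set.ofList_eq_foldl, PySem.Set.ofList_eq_foldl, List.foldl_append]

theorem update_ofList {α : Type} [BEq α] [LawfulBEq α] (s : PySem.Set α) (ys : List α) :
    s.update (PySem.Set.ofList ys) = s.update ys := by
  rw [PySem.Set.update_eq_append_filter, PySem.Set.update_eq_append_filter,
      PySem.Set.ofList_ofList]

theorem update_map_ofList {α β : Type} [BEq α] [LawfulBEq α] [BEq β] [LawfulBEq β]
    (s : PySem.Set β) (f : α → β) (xs : List α) :
    s.update ((PySem.Set.ofList xs).map f) = s.update (xs.map f) := by
  induction xs using List.reverseRecOn with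
  | nil => rfl
  | append_singleton xs x ih =>
      rw [PySem.Set.ofList_append_singleton]
      by_cases hx : x ∈ PySem.Set.ofList xs
      · rw [PySem.Set.add_of_mem hx, ih, List.map_append, PySem.Set.update_append]
        have hfx : f x ∈ s.update (xs.map f) := by
          have hxx : x ∈ xs := (PySem.Set.mem_ofList xs x).mp hx
          exact (PySem.Set.mem_update _ _ _).mpr (Or.inr (List.mem_map_of_mem hxx))
        rw [List.map_singleton, PySem.Set.update_cons, PySem.Set.add_of_mem hfx,
            PySem.Set.update_nil]
      · rw [PySem.Set.add_of_not_mem hx, List.map_append, List.map_append,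
            PySem.Set.update_append, PySem.Set.update_append, ih]

theorem pvCombine_eq (l1 l2 : List Char) :
    pvCombine (PySem.Set.ofList ((0, 0) :: pvPath 0 0 l1), pvDisp l1)
              (PySem.Set.ofList ((0, 0) :: pvPath 0 0 l2), pvDisp l2) =
      (PySem.Set.ofList ((0, 0) :: pvPath 0 0 (l1 ++ l2)), pvDisp (l1 ++ l2)) := by
  unfold pvCombine
  have hd1 : pvDisp l1 ∈ (((0 : Int), (0 : Int)) :: pvPath 0 0 l1) := by
    have := pvDisp_mem l1 0 0
    simpa using this
  apply Prod.ext
  · show PySem.Set.update _ _ = _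
    rw [update_ofList, update_map_ofList]
    have hm := pvPath_map (pvDisp l1).1 (pvDisp l1).2 l2 0 0
    simp only [add_zero] at hm
    rw [List.map_cons, ← hm]
    simp only [add_zero]
    rw [PySem.Set.update_cons,
        PySem.Set.add_of_mem ((PySem.Set.mem_ofList _ _).mpr hd1),
        ← PySem.Set.ofList_append]
    have hp := pvPath_append l1 l2 0 0
    simp only [zero_add] at hp
    rw [hp]
    rfl
  · simp [pvDisp_append]

theorem pvSolve_eq (l : List Char) :
    pvSolve l = (PySem.Set.ofList ((0, 0) :: pvPath 0 0 l), pvDisp l) := by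
  induction l using pvSolve.induct with
  | case1 => simp [pvSolve, pvPath, pvDisp]
  | case2 c =>
      show pvSolve [c] = _
      simp [pvSolve, pvPath, pvDisp, pvD]
  | case3 c1 c2 rest l mid ih1 ih2 =>
      rw [pvSolve]
      rw [ih1, ih2, pvCombine_eq, List.take_append_drop]

-- ===== VERDICT (by name: the statement is the Claim_ definition above) =====
theorem get_houses_spec : Claim_equal_get_houses := by
  intro script _
  unfold Spec_get_houses get_houses get_houses_alt
  rw [foldA, pvSolve_eq, foldl_add_ofList]
  rfl
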